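-- pv_equiv track=rewrite | github.com/shawnspitzel/cs336 | assignment1-basics/cs336_basics/tokenizer/bpe.py | _rebuild_word
-- ===== SOURCE A (Python) =====
-- def _rebuild_word(args):
--     """Worker function for parallel corpus rebuilding."""
--     word, merge_pair, merged_id = args
--     if len(word) < 2:
--         return word
--     new_word = []
--     i = 0
--     word_len = len(word)
--     while i < word_len:
--         if i < word_len - 1 and word[i] == merge_pair[0] and word[i+1] == merge_pair[1]:
--             new_word.append(merged_id)
--             i += 2
--         else:
--             new_word.append(word[i])
--             i += 1
--     return new_word
-- ===== SOURCE B (Python) =====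
-- _NOTHING = object()
--
-- def _rebuild_word(args):
--     """One left-to-right pass carrying a single held token; no index arithmetic."""
--     word, merge_pair, merged_id = args
--     a, b = merge_pair[0], merge_pair[1]
--     out = []
--     held = _NOTHING
--     for x in word:
--         if held is _NOTHING:
--             held = x
--         elif held == a and x == b:
--             out.append(merged_id)
--             held = _NOTHING
--         else:
--             out.append(held)
--             held = x
--     if held is not _NOTHING:
--         out.append(held)
--     return out
-- ===== Notes on version B (the rewrite author's own statement) =====
-- stated objective: alternative
-- what changed: replaces the index-based while loop with lookahead (word[i], word[i+1], i advancing by 1 or 2) by a single for-each pass over the elements that carries one held token as state (a tiny state machine), with no index arithmetic and no length guard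
import Mathlib
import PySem

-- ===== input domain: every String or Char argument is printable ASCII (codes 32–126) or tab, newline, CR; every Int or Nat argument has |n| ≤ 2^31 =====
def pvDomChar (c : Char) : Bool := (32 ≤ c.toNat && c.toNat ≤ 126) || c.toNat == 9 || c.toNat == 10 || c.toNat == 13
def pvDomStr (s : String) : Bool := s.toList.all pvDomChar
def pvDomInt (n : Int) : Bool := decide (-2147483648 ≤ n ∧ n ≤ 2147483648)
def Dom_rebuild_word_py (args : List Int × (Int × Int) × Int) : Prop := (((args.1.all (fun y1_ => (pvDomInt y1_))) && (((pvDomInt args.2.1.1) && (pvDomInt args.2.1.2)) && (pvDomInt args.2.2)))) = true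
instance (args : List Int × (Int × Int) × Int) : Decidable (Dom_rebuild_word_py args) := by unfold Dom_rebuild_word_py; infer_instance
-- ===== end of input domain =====

-- B replaces A's index-based while loop with lookahead by a single for-each pass
-- carrying one held token as state (objective: alternative decomposition, same cost).

-- ===== PORT A =====
-- the while loop of A: i advances by 2 on a merge, by 1 otherwise; new_word.append = acc ++ [·]
-- (word[i] is always in range here, so List.getD is exact for Python's word[i])
def rebuildLoopA (word : List Int) (a b m : Int) (i : Nat) (acc : List Int) : List Int :=
  if i < word.length then
    if i < word.length - 1 ∧ word.getD i 0 = a ∧ word.getD (i+1) 0 = b then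
      rebuildLoopA word a b m (i+2) (acc ++ [m])
    else
      rebuildLoopA word a b m (i+1) (acc ++ [word.getD i 0])
  else acc
termination_by word.length - i
decreasing_by all_goals omega

def rebuild_word_py (args : List Int × (Int × Int) × Int) : List Int :=
  let word := args.1
  let merge_pair := args.2.1
  let merged_id := args.2.2
  if word.length < 2 then word
  else rebuildLoopA word merge_pair.1 merge_pair.2 merged_id 0 []

-- ===== PORT B =====
-- one step of B's for-each pass: state = (output so far, held token or none)
def stepB (a b m : Int) (st : List Int × Option Int) (x : Int) : List Int × Option Int :=
  match st.2 with
  | none => (st.1, some x)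
  | some hv => if hv = a ∧ x = b then (st.1 ++ [m], none) else (st.1 ++ [hv], some x)

def rebuild_word_py_alt (args : List Int × (Int × Int) × Int) : List Int :=
  let word := args.1
  let a := args.2.1.1
  let b := args.2.1.2
  let m := args.2.2
  let st := word.foldl (stepB a b m) ([], none)
  match st.2 with
  | some hv => st.1 ++ [hv]
  | none => st.1

-- ===== PRECONDITION & SPEC =====
def Spec_rebuild_word_py (args : List Int × (Int × Int) × Int) (out : List Int) : Prop := out = rebuild_word_py_alt args
instance (args : List Int × (Int × Int) × Int) (out : List Int) : Decidable (Spec_rebuild_word_py args out) := by unfold Spec_rebuild_word_py; infer_instance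

-- ===== CLAIM (what is proved, stated in full; the proofs are below) =====
def Claim_equal_rebuild_word_py : Prop := ∀ (args : List Int × (Int × Int) × Int), Dom_rebuild_word_py args → Spec_rebuild_word_py args (rebuild_word_py args)

-- ===== LEMMAS AND PROOFS =====

-- reference function both ports are reduced to: greedy left-to-right pair merging
def mergedRef (a b m : Int) : List Int → List Int
  | [] => []
  | [x] => [x]
  | x :: y :: t =>
      if x = a ∧ y = b then m :: mergedRef a b m t
      else x :: mergedRef a b m (y :: t)

-- B's finishing step, for stating the fold invariant
def finishB (st : List Int × Option Int) : List Int :=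
  match st.2 with
  | some hv => st.1 ++ [hv]
  | none => st.1

lemma foldB_invariant (a b m : Int) (l : List Int) :
    ∀ out : List Int,
      finishB (l.foldl (stepB a b m) (out, none)) = out ++ mergedRef a b m l
      ∧ ∀ v : Int, finishB (l.foldl (stepB a b m) (out, some v)) = out ++ mergedRef a b m (v :: l) := by
  induction l with
  | nil => intro out; exact ⟨by simp [finishB, mergedRef], fun v => by simp [finishB, mergedRef]⟩
  | cons x t ih =>
    intro out
    constructor
    · simpa [List.foldl_cons, stepB] using (ih out).2 x
    · intro v
      simp only [List.foldl_cons, stepB]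
      by_cases h : v = a ∧ x = b
      · simp only [if_pos h]
        rw [(ih (out ++ [m])).1, mergedRef, if_pos h]
        simp
      · simp only [if_neg h]
        rw [((ih (out ++ [v])).2 x), mergedRef, if_neg h]
        simp

lemma loopA_eq (word : List Int) (a b m : Int) :
    ∀ i acc, rebuildLoopA word a b m i acc = acc ++ mergedRef a b m (word.drop i) := by
  have key : ∀ (n : Nat), ∀ i acc, word.length - i ≤ n →
      rebuildLoopA word a b m i acc = acc ++ mergedRef a b m (word.drop i) := by
    intro n
    induction n with
    | zero =>
      intro i acc h
      rw [rebuildLoopA, if_neg (by omega), List.drop_eq_nil_of_le (by omega), mergedRef]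
      simp
    | succ n ihn =>
      intro i acc h
      rw [rebuildLoopA]
      by_cases hi : i < word.length
      · have hdrop : word.drop i = word[i] :: word.drop (i + 1) :=
          List.drop_eq_getElem_cons hi
        rw [if_pos hi]
        by_cases hc : i < word.length - 1 ∧ word.getD i 0 = a ∧ word.getD (i+1) 0 = b
        · have hclt : i < word.length - 1 := hc.1
          have hi1 : i + 1 < word.length := by omega
          have hdrop1 : word.drop (i+1) = word[i+1] :: word.drop (i + 2) :=
            List.drop_eq_getElem_cons hi1
          have ha : word[i] = a := by
            have := hc.2.1; rwa [List.getD_eq_getElem _ _ hi] at this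
          have hb : word[i+1] = b := by
            have := hc.2.2; rwa [List.getD_eq_getElem _ _ hi1] at this
          rw [if_pos hc, ihn (i+2) (acc ++ [m]) (by omega), hdrop, hdrop1,
            mergedRef, if_pos ⟨ha, hb⟩]
          simp
        · rw [if_neg hc, ihn (i+1) (acc ++ [word.getD i 0]) (by omega),
            List.getD_eq_getElem _ _ hi, hdrop]
          have hmerged : mergedRef a b m (word[i] :: word.drop (i+1))
              = word[i] :: mergedRef a b m (word.drop (i+1)) := by
            by_cases hi1 : i + 1 < word.length
            · have hdrop1 : word.drop (i+1) = word[i+1] :: word.drop (i + 2) :=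
                List.drop_eq_getElem_cons hi1
              have hab : ¬ (word[i] = a ∧ word[i+1] = b) := by
                intro hh
                exact hc ⟨by omega,
                  by rw [List.getD_eq_getElem _ _ hi]; exact hh.1,
                  by rw [List.getD_eq_getElem _ _ hi1]; exact hh.2⟩
              rw [hdrop1, mergedRef, if_neg hab]
            · have hnil : word.drop (i+1) = [] := List.drop_eq_nil_of_le (by omega)
              rw [hnil]
              simp [mergedRef]
          rw [hmerged]; simp
      · rw [if_neg hi, List.drop_eq_nil_of_le (by omega), mergedRef]
        simp
  intro i acc
  exact key (word.length - i) i acc le_rfl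

lemma portA_eq_ref (word : List Int) (a b m : Int) :
    rebuild_word_py (word, (a, b), m) = mergedRef a b m word := by
  show (if word.length < 2 then word
        else rebuildLoopA word a b m 0 []) = _
  by_cases h : word.length < 2
  · rw [if_pos h]
    match word, h with
    | [], _ => rfl
    | [x], _ => rfl
  · rw [if_neg h, loopA_eq word a b m 0 [], List.drop_zero, List.nil_append]

lemma portB_eq_ref (word : List Int) (a b m : Int) :
    rebuild_word_py_alt (word, (a, b), m) = mergedRef a b m word := by
  show finishB (word.foldl (stepB a b m) ([], none)) = _
  rw [(foldB_invariant a b m word []).1, List.nil_append]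

-- ===== VERDICT (by name: the statement is the Claim_ definition above) =====
theorem rebuild_word_py_spec : Claim_equal_rebuild_word_py := by
  intro args _
  obtain ⟨word, ⟨a, b⟩, m⟩ := args
  unfold Spec_rebuild_word_py
  rw [portA_eq_ref, portB_eq_ref]
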